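-- pv_equiv track=rewrite | github.com/ngoduythinh250601/Codelearn | All/primaryFactor347/primaryFactor347.py | primaryFactor347
-- ===== SOURCE A (Python) =====
-- def primaryFactor347(n):
--     if n <= 1:
--         return False
--     while n % 3 == 0:
--         n //= 3
--     while n % 4 == 0:
--         n //= 4
--     while n % 7 == 0:
--         n //= 7
--     return n == 1
-- ===== SOURCE B (Python) =====
-- def primaryFactor347(n):
--     if n <= 1:
--         return False
--     factors = {}
--     m = n
--     d = 2
--     while d * d <= m:
--         while m % d == 0:
--             factors[d] = factors.get(d, 0) + 1
--             m //= d
--         d += 1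
--     if m > 1:
--         factors[m] = factors.get(m, 0) + 1
--     return set(factors) <= {2, 3, 7} and factors.get(2, 0) % 2 == 0
-- ===== Notes on version B (the rewrite author's own statement) =====
-- stated objective: alternative
-- what changed: B computes the full prime factorization of n by trial division up to sqrt into a dict prime->exponent and returns True iff every prime factor is in {2,3,7} and the exponent of 2 is even; A instead repeatedly divides by 3, by the composite 4, and by 7 and tests for 1.
import Mathlib
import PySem

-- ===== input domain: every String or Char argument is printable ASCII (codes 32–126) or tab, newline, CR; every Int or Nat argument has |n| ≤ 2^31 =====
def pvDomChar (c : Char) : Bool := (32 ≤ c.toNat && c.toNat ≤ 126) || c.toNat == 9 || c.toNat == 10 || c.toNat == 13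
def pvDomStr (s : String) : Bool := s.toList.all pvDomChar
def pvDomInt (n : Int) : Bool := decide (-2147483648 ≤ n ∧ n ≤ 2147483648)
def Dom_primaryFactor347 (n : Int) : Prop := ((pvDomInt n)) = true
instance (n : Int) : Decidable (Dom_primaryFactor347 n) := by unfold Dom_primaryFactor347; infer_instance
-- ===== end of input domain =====

-- B replaces A's staged divisions by 3, the composite 4 and 7 with a full trial-division prime
-- factorization into a dict prime -> exponent, accepting iff all prime factors lie in {2,3,7}
-- and the exponent of 2 is even (alternative algorithm, not claimed faster).

-- ===== PORT A =====
-- generic 'while n % p == 0: n //= p' loop; the '2 ≤ p ∧ 1 ≤ n' guard only makes the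
-- recursion total — it always holds where A's loops actually run (p ∈ {3,4,7}, n ≥ 2)
def pvStrip (p n : Int) : Int :=
  if _h : 2 ≤ p ∧ 1 ≤ n ∧ PySem.Int.mod n p = 0 then
    pvStrip p (PySem.Int.floordiv n p)
  else n
termination_by n.toNat
decreasing_by
  have hp : (0:Int) < p := by omega
  rw [PySem.Int.floordiv_eq_ediv_of_pos hp]
  have h1 : n / p < n := Int.ediv_lt_of_lt_mul (by omega) (by nlinarith)
  omega

def primaryFactor347 (n : Int) : Bool :=
  if n ≤ 1 then false
  else pvStrip 7 (pvStrip 4 (pvStrip 3 n)) == 1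

-- ===== PORT B =====
-- inner loop 'while m % d == 0: factors[d] = factors.get(d, 0) + 1; m //= d'
-- (the '2 ≤ d ∧ 1 ≤ m' guard only makes the recursion total; it always holds where B runs)
def pvInner (d : Int) (fac : PySem.Dict Int Int) (m : Int) : PySem.Dict Int Int × Int :=
  if _h : 2 ≤ d ∧ 1 ≤ m ∧ PySem.Int.mod m d = 0 then
    pvInner d (fac.insert d (fac.getD d 0 + 1)) (PySem.Int.floordiv m d)
  else (fac, m)
termination_by m.toNat
decreasing_by
  have hp : (0:Int) < d := by omega
  rw [PySem.Int.floordiv_eq_ediv_of_pos hp]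
  have h1 : m / d < m := Int.ediv_lt_of_lt_mul (by omega) (by nlinarith)
  omega

-- termination lemma for the outer loop: the inner loop does not increase m and keeps it ≥ 1
lemma pvInner_snd_bounds : ∀ (k : ℕ) (d m : Int) (fac : PySem.Dict Int Int), m.toNat ≤ k →
    2 ≤ d → 1 ≤ m → 1 ≤ (pvInner d fac m).2 ∧ (pvInner d fac m).2 ≤ m := by
  intro k
  induction k with
  | zero => intro d m fac hk hd hm; omega
  | succ k ih =>
    intro d m fac hk hd hm
    rw [pvInner]
    by_cases hg : 2 ≤ d ∧ 1 ≤ m ∧ PySem.Int.mod m d = 0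
    · rw [dif_pos hg]
      have hdv : PySem.Int.floordiv m d = m / d := PySem.Int.floordiv_eq_ediv_of_pos (by omega)
      have hmod : m % d = 0 := by
        have := hg.2.2; rwa [PySem.Int.mod_eq_emod_of_pos (by omega)] at this
      have hdvd : d ∣ m := Int.dvd_of_emod_eq_zero hmod
      have h1 : m / d < m := Int.ediv_lt_of_lt_mul (by omega) (by nlinarith)
      have h0 : 0 ≤ m / d := Int.ediv_nonneg (by omega) (by omega)
      have hq : m / d * d = m := Int.ediv_mul_cancel hdvd
      have hq1 : 1 ≤ m / d := by
        rcases eq_or_lt_of_le h0 with h | h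
        · rw [← h] at hq; simp at hq; omega
        · omega
      rw [hdv]
      obtain ⟨ha, hb⟩ := ih d (m / d) (fac.insert d (fac.getD d 0 + 1)) (by omega) hd hq1
      exact ⟨ha, by omega⟩
    · rw [dif_neg hg]; exact ⟨hm, le_refl m⟩

-- outer loop 'while d * d <= m: <inner loop>; d += 1'
def pvOuter (fac : PySem.Dict Int Int) (m d : Int) : PySem.Dict Int Int × Int :=
  if _h : 2 ≤ d ∧ d * d ≤ m then
    pvOuter (pvInner d fac m).1 (pvInner d fac m).2 (d + 1)
  else (fac, m)
termination_by (m + 2 - d).toNat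
decreasing_by
  have hm : 1 ≤ m := by nlinarith [_h.1, _h.2]
  obtain ⟨h1, h2⟩ := pvInner_snd_bounds m.toNat d m fac (le_refl _) _h.1 hm
  have hd : d ≤ m := by nlinarith [_h.1, _h.2]
  omega

def primaryFactor347_alt (n : Int) : Bool :=
  if n ≤ 1 then false
  else
    let st := pvOuter PySem.Dict.empty n 2
    let fac := if 1 < st.2 then st.1.insert st.2 (st.1.getD st.2 0 + 1) else st.1
    fac.keys.all (fun k => k == 2 || k == 3 || k == 7) && (PySem.Int.mod (fac.getD 2 0) 2 == 0)

-- ===== PRECONDITION & SPEC =====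
def Spec_primaryFactor347 (n : Int) (out : Bool) : Prop := out = primaryFactor347_alt n
instance (n : Int) (out : Bool) : Decidable (Spec_primaryFactor347 n out) := by unfold Spec_primaryFactor347; infer_instance

-- ===== CLAIM (what is proved, stated in full; the proofs are below) =====
def Claim_equal_primaryFactor347 : Prop := ∀ (n : Int), Dom_primaryFactor347 n → Spec_primaryFactor347 n (primaryFactor347 n)

-- ===== LEMMAS AND PROOFS =====

-- Nat-level model of a strip loop and its count
def nStrip (p n : ℕ) : ℕ :=
  if _h : 2 ≤ p ∧ 1 ≤ n ∧ p ∣ n then nStrip p (n / p) else n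
termination_by n
decreasing_by exact Nat.div_lt_self (by omega) (by omega)

def nCount (p n : ℕ) : ℕ :=
  if _h : 2 ≤ p ∧ 1 ≤ n ∧ p ∣ n then nCount p (n / p) + 1 else 0
termination_by n
decreasing_by exact Nat.div_lt_self (by omega) (by omega)

lemma nStrip_of_not_dvd (p n : ℕ) (h : ¬ p ∣ n) : nStrip p n = n := by
  rw [nStrip, dif_neg (fun hc => h hc.2.2)]

lemma nCount_of_not_dvd (p n : ℕ) (h : ¬ p ∣ n) : nCount p n = 0 := by
  rw [nCount, dif_neg (fun hc => h hc.2.2)]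

lemma nStrip_step (p n : ℕ) (h : 2 ≤ p ∧ 1 ≤ n ∧ p ∣ n) : nStrip p n = nStrip p (n / p) := by
  rw [nStrip, dif_pos h]

lemma nCount_step (p n : ℕ) (h : 2 ≤ p ∧ 1 ≤ n ∧ p ∣ n) : nCount p n = nCount p (n / p) + 1 := by
  rw [nCount, dif_pos h]

lemma nStrip_le (p : ℕ) : ∀ n, nStrip p n ≤ n := by
  intro n
  induction n using Nat.strong_induction_on with
  | _ n ih =>
    rw [nStrip]
    by_cases h : 2 ≤ p ∧ 1 ≤ n ∧ p ∣ n
    · rw [dif_pos h]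
      exact le_trans (ih (n / p) (Nat.div_lt_self (by omega) (by omega))) (Nat.div_le_self n p)
    · rw [dif_neg h]

lemma nStrip_pos (p : ℕ) : ∀ n, 1 ≤ n → 1 ≤ nStrip p n := by
  intro n
  induction n using Nat.strong_induction_on with
  | _ n ih =>
    intro hn
    rw [nStrip]
    by_cases h : 2 ≤ p ∧ 1 ≤ n ∧ p ∣ n
    · rw [dif_pos h]
      have hple : p ≤ n := Nat.le_of_dvd (by omega) h.2.2
      exact ih (n / p) (Nat.div_lt_self (by omega) (by omega))
        ((Nat.le_div_iff_mul_le (by omega)).mpr (by omega))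
    · rw [dif_neg h]; exact hn

lemma nStrip_dvd (p : ℕ) : ∀ n, nStrip p n ∣ n := by
  intro n
  induction n using Nat.strong_induction_on with
  | _ n ih =>
    rw [nStrip]
    by_cases h : 2 ≤ p ∧ 1 ≤ n ∧ p ∣ n
    · rw [dif_pos h]
      exact dvd_trans (ih (n / p) (Nat.div_lt_self (by omega) (by omega)))
        (Nat.div_dvd_of_dvd h.2.2)
    · rw [dif_neg h]

lemma nStrip_not_dvd (p : ℕ) (hp : 2 ≤ p) : ∀ n, 1 ≤ n → ¬ p ∣ nStrip p n := by
  intro n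
  induction n using Nat.strong_induction_on with
  | _ n ih =>
    intro hn
    rw [nStrip]
    by_cases h : 2 ≤ p ∧ 1 ≤ n ∧ p ∣ n
    · rw [dif_pos h]
      have hple : p ≤ n := Nat.le_of_dvd (by omega) h.2.2
      exact ih (n / p) (Nat.div_lt_self (by omega) (by omega))
        ((Nat.le_div_iff_mul_le (by omega)).mpr (by omega))
    · rw [dif_neg h]; exact fun hc => h ⟨hp, hn, hc⟩

lemma nDecomp (p : ℕ) (hp : 2 ≤ p) : ∀ n, 1 ≤ n → n = p ^ nCount p n * nStrip p n := by
  intro n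
  induction n using Nat.strong_induction_on with
  | _ n ih =>
    intro hn
    by_cases h : p ∣ n
    · rw [nCount_step p n ⟨hp, hn, h⟩, nStrip_step p n ⟨hp, hn, h⟩]
      have hple : p ≤ n := Nat.le_of_dvd (by omega) h
      have hq1 : 1 ≤ n / p := (Nat.le_div_iff_mul_le (by omega)).mpr (by omega)
      have := ih (n / p) (Nat.div_lt_self (by omega) (by omega)) hq1
      calc n = (n / p) * p := (Nat.div_mul_cancel h).symm
        _ = p ^ nCount p (n / p) * nStrip p (n / p) * p := by rw [← this]
        _ = p ^ (nCount p (n / p) + 1) * nStrip p (n / p) := by ring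
    · rw [nCount_of_not_dvd p n h, nStrip_of_not_dvd p n h]; simp

lemma nCount_pos_of_dvd (p n : ℕ) (hp : 2 ≤ p) (hn : 1 ≤ n) (h : p ∣ n) : 1 ≤ nCount p n := by
  rw [nCount_step p n ⟨hp, hn, h⟩]; omega

-- the trial-division model: list of (prime, exponent) entries found from divisor d upward, and the residual
def nFac (m d : ℕ) : List (ℕ × ℕ) × ℕ :=
  if _h : 2 ≤ d ∧ d * d ≤ m then
    ((if nCount d m = 0 then (nFac (nStrip d m) (d + 1)).1
      else (d, nCount d m) :: (nFac (nStrip d m) (d + 1)).1),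
     (nFac (nStrip d m) (d + 1)).2)
  else ([], m)
termination_by m + 2 - d
decreasing_by
  all_goals
    have h1 := nStrip_le d m
    have h2 : d ≤ d * d := Nat.le_mul_of_pos_left d (by omega)
    omega

-- nFac's entries followed by the residual (if > 1): the full factorization list
def nFull (m d : ℕ) : List (ℕ × ℕ) :=
  (nFac m d).1 ++ (if 1 < (nFac m d).2 then [((nFac m d).2, 1)] else [])

def prodPow (l : List (ℕ × ℕ)) : ℕ := l.foldr (fun pk acc => pk.1 ^ pk.2 * acc) 1

def lkp (l : List (ℕ × ℕ)) (p : ℕ) : ℕ := ((l.find? (fun pk => pk.1 == p)).map Prod.snd).getD 0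

lemma lkp_cons (q k : ℕ) (t : List (ℕ × ℕ)) (p : ℕ) :
    lkp ((q, k) :: t) p = if q = p then k else lkp t p := by
  by_cases h : q = p
  · simp [lkp, List.find?, h]
  · have hb : (q == p) = false := by simp [h]
    simp [lkp, List.find?, hb, h]

lemma lkp_nil (p : ℕ) : lkp [] p = 0 := rfl

lemma lkp_not_mem (l : List (ℕ × ℕ)) (p : ℕ) (h : p ∉ l.map Prod.fst) : lkp l p = 0 := by
  induction l with
  | nil => rfl
  | cons hd t ih =>
    obtain ⟨q, k⟩ := hd
    simp only [List.map_cons, List.mem_cons] at h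
    push Not at h
    rw [lkp_cons, if_neg (fun hc => h.1 hc.symm)]
    exact ih h.2

lemma lkp_mem (l : List (ℕ × ℕ)) (p : ℕ) (h : p ∈ l.map Prod.fst) : (p, lkp l p) ∈ l := by
  induction l with
  | nil => simp at h
  | cons hd t ih =>
    obtain ⟨q, k⟩ := hd
    rw [lkp_cons]
    by_cases hq : q = p
    · subst hq; simp
    · simp only [List.map_cons, List.mem_cons] at h
      rcases h with h | h
      · exact absurd h.symm hq
      · rw [if_neg hq]; exact List.mem_cons_of_mem _ (ih h)


lemma nFac_pos (m d : ℕ) (h : 2 ≤ d ∧ d * d ≤ m) :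
    nFac m d = ((if nCount d m = 0 then (nFac (nStrip d m) (d + 1)).1
      else (d, nCount d m) :: (nFac (nStrip d m) (d + 1)).1),
     (nFac (nStrip d m) (d + 1)).2) := by
  rw [nFac, dif_pos h]

lemma nFac_neg (m d : ℕ) (h : ¬ (2 ≤ d ∧ d * d ≤ m)) : nFac m d = ([], m) := by
  rw [nFac, dif_neg h]

lemma nFull_pos (m d : ℕ) (h : 2 ≤ d ∧ d * d ≤ m) :
    nFull m d = (if nCount d m = 0 then [] else [(d, nCount d m)]) ++ nFull (nStrip d m) (d + 1) := by
  unfold nFull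
  rw [nFac_pos m d h]
  by_cases hc : nCount d m = 0 <;> simp [hc]

lemma nFac_base (m d : ℕ) (hd : 2 ≤ d) (hm : 1 ≤ m) (hng : ¬ d * d ≤ m)
    (hinv : ∀ e, 2 ≤ e → e < d → ¬ e ∣ m) :
    m = prodPow (nFull m d)
    ∧ (∀ pk ∈ nFull m d, Nat.Prime pk.1 ∧ 1 ≤ pk.2 ∧ d ≤ pk.1)
    ∧ (nFull m d).Pairwise (fun x y => x.1 < y.1) := by
  have hfac : nFac m d = ([], m) := nFac_neg m d (fun hc => hng hc.2)
  by_cases h1 : 1 < m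
  · have hfull : nFull m d = [(m, 1)] := by unfold nFull; rw [hfac]; simp [h1]
    have hpp : Nat.Prime m.minFac := Nat.minFac_prime (by omega)
    have hdp : d ≤ m.minFac := by
      by_contra hc
      exact hinv m.minFac hpp.two_le (by omega) (Nat.minFac_dvd m)
    have hmp : Nat.Prime m := by
      by_contra hc
      have hsq := Nat.minFac_sq_le_self (by omega) hc
      have : d * d ≤ m.minFac * m.minFac := Nat.mul_le_mul hdp hdp
      have : m.minFac ^ 2 = m.minFac * m.minFac := by ring
      omega
    refine ⟨by simp [hfull, prodPow], ?_, by simp [hfull]⟩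
    intro pk hpk
    simp only [hfull, List.mem_singleton] at hpk
    subst hpk
    exact ⟨hmp, le_refl 1, le_trans hdp (Nat.minFac_le (by omega))⟩
  · have hm1 : m = 1 := by omega
    subst hm1
    have hfull : nFull 1 d = [] := by unfold nFull; rw [hfac]; simp
    refine ⟨by simp [hfull, prodPow], by simp [hfull], by simp [hfull]⟩

lemma nFac_spec : ∀ (k m d : ℕ), m + 2 - d ≤ k → 2 ≤ d → 1 ≤ m →
    (∀ e, 2 ≤ e → e < d → ¬ e ∣ m) →
    m = prodPow (nFull m d)
    ∧ (∀ pk ∈ nFull m d, Nat.Prime pk.1 ∧ 1 ≤ pk.2 ∧ d ≤ pk.1)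
    ∧ (nFull m d).Pairwise (fun x y => x.1 < y.1) := by
  intro k
  induction k with
  | zero =>
    intro m d hk hd hm hinv
    refine nFac_base m d hd hm ?_ hinv
    intro hgg
    have h2 : d ≤ d * d := Nat.le_mul_of_pos_left d (by omega)
    omega
  | succ k ih =>
    intro m d hk hd hm hinv
    by_cases hg : d * d ≤ m
    · have hdm : d ≤ m := le_trans (Nat.le_mul_of_pos_left d (by omega)) hg
      have hm' : 1 ≤ nStrip d m := nStrip_pos d m hm
      have hle : nStrip d m ≤ m := nStrip_le d m
      have hinv' : ∀ e, 2 ≤ e → e < d + 1 → ¬ e ∣ nStrip d m := by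
        intro e he hlt hdvd
        by_cases hed : e = d
        · exact nStrip_not_dvd d hd m hm (hed ▸ hdvd)
        · exact hinv e he (by omega) (dvd_trans hdvd (nStrip_dvd d m))
      obtain ⟨ihp, ihe, ihpw⟩ := ih (nStrip d m) (d + 1) (by omega) (by omega) hm' hinv'
      rw [nFull_pos m d ⟨hd, hg⟩]
      by_cases hc : nCount d m = 0
      · have hnd : ¬ d ∣ m := fun hdvd => by
          have := nCount_pos_of_dvd d m hd hm hdvd; omega
        have hstr : nStrip d m = m := nStrip_of_not_dvd d m hnd
        rw [if_pos hc, List.nil_append, hstr]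
        rw [hstr] at ihp ihe ihpw
        exact ⟨ihp, fun pk hpk => ⟨(ihe pk hpk).1, (ihe pk hpk).2.1, by
          have := (ihe pk hpk).2.2; omega⟩, ihpw⟩
      · have hdvd : d ∣ m := by
          by_contra hnd
          exact hc (nCount_of_not_dvd d m hnd)
        have hdp : Nat.Prime d := by
          by_contra hnp
          have hq : Nat.Prime d.minFac := Nat.minFac_prime (by omega)
          have hqd : d.minFac ≠ d := fun hc' =>
            hnp (Nat.prime_def_minFac.mpr ⟨hd, hc'⟩)
          have hqle : d.minFac ≤ d := Nat.minFac_le (by omega)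
          exact hinv d.minFac hq.two_le (by omega)
            (dvd_trans (Nat.minFac_dvd d) hdvd)
        rw [if_neg hc, List.singleton_append]
        refine ⟨?_, ?_, ?_⟩
        · have : prodPow ((d, nCount d m) :: nFull (nStrip d m) (d + 1))
              = d ^ nCount d m * prodPow (nFull (nStrip d m) (d + 1)) := rfl
          rw [this, ← ihp]
          exact nDecomp d hd m hm
        · intro pk hpk
          rcases List.mem_cons.mp hpk with h | h
          · subst h; exact ⟨hdp, by omega, le_refl d⟩
          · obtain ⟨hp1, hp2, hp3⟩ := ihe pk h
            exact ⟨hp1, hp2, by omega⟩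
        · rw [List.pairwise_cons]
          exact ⟨fun y hy => by have := (ihe y hy).2.2; simp; omega, ihpw⟩
    · exact nFac_base m d hd hm hg hinv


lemma prodPow_dvd (l : List (ℕ × ℕ)) (pk : ℕ × ℕ) (h : pk ∈ l) : pk.1 ^ pk.2 ∣ prodPow l := by
  induction l with
  | nil => simp at h
  | cons hd t ih =>
    rcases List.mem_cons.mp h with h | h
    · subst h; exact Dvd.intro _ rfl
    · exact dvd_mul_of_dvd_right (ih h) _

lemma prodPow_lookup : ∀ l : List (ℕ × ℕ), (l.map Prod.fst).Nodup →
    (∀ pk ∈ l, pk.1 = 2 ∨ pk.1 = 3 ∨ pk.1 = 7) →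
    prodPow l = 2 ^ lkp l 2 * 3 ^ lkp l 3 * 7 ^ lkp l 7 := by
  intro l
  induction l with
  | nil => intro _ _; simp [prodPow, lkp_nil]
  | cons hd t ih =>
    intro hnd hks
    obtain ⟨q, k⟩ := hd
    simp only [List.map_cons, List.nodup_cons] at hnd
    have hqt : ∀ p, q = p → lkp t p = 0 := fun p hp =>
      lkp_not_mem t p (hp ▸ hnd.1)
    have hpp : prodPow ((q, k) :: t) = q ^ k * prodPow t := rfl
    rw [hpp, ih hnd.2 (fun pk hpk => hks pk (List.mem_cons_of_mem _ hpk)),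
        lkp_cons, lkp_cons, lkp_cons]
    rcases hks (q, k) List.mem_cons_self with h | h | h <;>
      simp only at h <;> subst h
    · rw [if_pos rfl, if_neg (by omega), if_neg (by omega), hqt 2 rfl]
      ring
    · rw [if_neg (by omega), if_pos rfl, if_neg (by omega), hqt 3 rfl]
      ring
    · rw [if_neg (by omega), if_neg (by omega), if_pos rfl, hqt 7 rfl]
      ring

lemma two_pow_unique : ∀ k j m m' : ℕ, ¬ 2 ∣ m → ¬ 2 ∣ m' → 2 ^ k * m = 2 ^ j * m' → k = j ∧ m = m' := by
  intro k
  induction k with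
  | zero =>
    intro j m m' hm hm' h
    cases j with
    | zero => simpa using h
    | succ j =>
      exact absurd ⟨2 ^ j * m', by simp at h; rw [h, pow_succ]; ring⟩ hm
  | succ k ih =>
    intro j m m' hm hm' h
    cases j with
    | zero =>
      exact absurd ⟨2 ^ k * m, by simp at h; rw [← h, pow_succ]; ring⟩ hm'
    | succ j =>
      have h' : 2 ^ k * m = 2 ^ j * m' := by
        have := h
        rw [pow_succ, pow_succ] at this
        have h2 : 2 * (2 ^ k * m) = 2 * (2 ^ j * m') := by ring_nf; ring_nf at this; omega
        omega
      obtain ⟨hk, hm⟩ := ih j m m' hm hm' h'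
      exact ⟨by omega, hm⟩

lemma not_dvd_of_prime_pows {p q r : ℕ} (hp : Nat.Prime p) (hq : ¬ p ∣ q) (hr : ¬ p ∣ r) :
    ∀ a c, ¬ p ∣ q ^ a * r ^ c := by
  intro a c h
  rcases (Nat.Prime.dvd_mul hp).mp h with h' | h'
  · exact hq (Nat.Prime.dvd_of_dvd_pow hp h')
  · exact hr (Nat.Prime.dvd_of_dvd_pow hp h')

-- the central model fact: B's acceptance condition characterizes 3^a * 4^b * 7^c
lemma model_decision (N : ℕ) (hN : 2 ≤ N) :
    ((∀ pk ∈ nFull N 2, pk.1 = 2 ∨ pk.1 = 3 ∨ pk.1 = 7) ∧ 2 ∣ lkp (nFull N 2) 2)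
      ↔ ∃ a b c, N = 3 ^ a * 4 ^ b * 7 ^ c := by
  obtain ⟨hP, hE, hPW⟩ := nFac_spec (N + 2) N 2 (by omega) (by omega) (by omega)
    (by intro e he hlt; omega)
  have hnodup : ((nFull N 2).map Prod.fst).Nodup :=
    (hPW.map Prod.fst (fun _ _ h => h)).imp ne_of_lt
  constructor
  · rintro ⟨hkeys, ⟨b, hb⟩⟩
    refine ⟨lkp (nFull N 2) 3, b, lkp (nFull N 2) 7, ?_⟩
    conv_lhs => rw [hP]
    rw [prodPow_lookup _ hnodup hkeys, hb,
        show (2:ℕ) ^ (2 * b) = 4 ^ b by rw [pow_mul]; norm_num]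
    ring
  · rintro ⟨a, b, c, hN347⟩
    have hN2 : N = 2 ^ (2 * b) * (3 ^ a * 7 ^ c) := by
      rw [hN347, show (4:ℕ) ^ b = 2 ^ (2 * b) by rw [pow_mul]; norm_num]
      ring
    have hkeys : ∀ pk ∈ nFull N 2, pk.1 = 2 ∨ pk.1 = 3 ∨ pk.1 = 7 := by
      intro pk hpk
      obtain ⟨hp, hk1, _⟩ := hE pk hpk
      have hdvdN : pk.1 ∣ N := by
        rw [hP]
        exact dvd_trans (dvd_pow_self pk.1 (by omega)) (prodPow_dvd _ pk hpk)
      rw [hN2] at hdvdN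
      rcases (Nat.Prime.dvd_mul hp).mp hdvdN with h | h
      · exact Or.inl ((Nat.prime_dvd_prime_iff_eq hp (by norm_num)).mp (hp.dvd_of_dvd_pow h))
      rcases (Nat.Prime.dvd_mul hp).mp h with h' | h'
      · exact Or.inr (Or.inl
          ((Nat.prime_dvd_prime_iff_eq hp (by norm_num)).mp (hp.dvd_of_dvd_pow h')))
      · exact Or.inr (Or.inr
          ((Nat.prime_dvd_prime_iff_eq hp (by norm_num)).mp (hp.dvd_of_dvd_pow h')))
    refine ⟨hkeys, ?_⟩
    have hprod := hP
    rw [prodPow_lookup _ hnodup hkeys] at hprod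
    have h1 : 2 ^ lkp (nFull N 2) 2 * (3 ^ lkp (nFull N 2) 3 * 7 ^ lkp (nFull N 2) 7)
        = 2 ^ (2 * b) * (3 ^ a * 7 ^ c) := by
      rw [← mul_assoc, ← hprod, ← hN2]
    have hodd1 : ¬ 2 ∣ (3:ℕ) ^ lkp (nFull N 2) 3 * 7 ^ lkp (nFull N 2) 7 :=
      not_dvd_of_prime_pows (by norm_num) (by decide) (by decide) _ _
    have hodd2 : ¬ 2 ∣ (3:ℕ) ^ a * 7 ^ c :=
      not_dvd_of_prime_pows (by norm_num) (by decide) (by decide) _ _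
    obtain ⟨hk2b, _⟩ := two_pow_unique _ _ _ _ hodd1 hodd2 h1
    exact ⟨b, hk2b⟩


-- ===== A-side characterization =====
lemma pvStrip_natCast (p : ℕ) (hp : 2 ≤ p) : ∀ n : ℕ, pvStrip (p : Int) (n : Int) = ((nStrip p n : ℕ) : Int) := by
  intro n
  induction n using Nat.strong_induction_on with
  | _ n ih =>
    rw [pvStrip, nStrip]
    have hdvd : PySem.Int.mod (n : Int) (p : Int) = 0 ↔ p ∣ n := by
      rw [PySem.Int.mod_natCast]
      exact_mod_cast (Nat.dvd_iff_mod_eq_zero (m := p) (n := n)).symm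
    by_cases hd : 1 ≤ n ∧ p ∣ n
    · rw [dif_pos ⟨by exact_mod_cast hp, by exact_mod_cast hd.1, hdvd.mpr hd.2⟩,
          dif_pos ⟨hp, hd.1, hd.2⟩, PySem.Int.floordiv_natCast]
      exact ih (n / p) (Nat.div_lt_self (by omega) (by omega))
    · rw [dif_neg (fun hc => hd ⟨by exact_mod_cast hc.2.1, hdvd.mp hc.2.2⟩),
          dif_neg (fun hc => hd ⟨hc.2.1, hc.2.2⟩)]

lemma nStrip_spec (p : ℕ) (hp : 2 ≤ p) : ∀ n : ℕ, 1 ≤ n →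
    ∃ k, n = p ^ k * nStrip p n ∧ ¬ p ∣ nStrip p n ∧ 1 ≤ nStrip p n := by
  intro n hn
  exact ⟨nCount p n, nDecomp p hp n hn, nStrip_not_dvd p hp n hn, nStrip_pos p n hn⟩

lemma nStrip_pow_mul (p : ℕ) (hp : 2 ≤ p) (m : ℕ) (hm : 1 ≤ m) :
    ∀ a, nStrip p (p ^ a * m) = nStrip p m := by
  intro a
  induction a with
  | zero => simp
  | succ a ih =>
    conv_lhs => rw [nStrip]
    have hpos : 1 ≤ p ^ (a + 1) * m :=
      Nat.mul_pos (Nat.pow_pos (by omega)) hm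
    have hdvd : p ∣ p ^ (a + 1) * m := Dvd.dvd.mul_right (dvd_pow_self p (Nat.succ_ne_zero a)) m
    rw [dif_pos ⟨hp, hpos, hdvd⟩]
    have hdiv : p ^ (a + 1) * m / p = p ^ a * m := by
      rw [pow_succ, mul_comm (p ^ a) p, mul_assoc, Nat.mul_div_cancel_left _ (by omega)]
    rw [hdiv, ih]

lemma not_four_dvd_seven_pow : ∀ c, ¬ (4:ℕ) ∣ 7 ^ c := by
  intro c h
  have hcop : Nat.Coprime 4 (7 ^ c) := Nat.Coprime.pow_right c (by decide)
  have : (4:ℕ) ∣ Nat.gcd 4 (7 ^ c) := Nat.dvd_gcd dvd_rfl h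
  rw [hcop] at this
  exact absurd (Nat.le_of_dvd one_pos this) (by omega)

lemma A_char (n : ℕ) (hn : 1 ≤ n) :
    nStrip 7 (nStrip 4 (nStrip 3 n)) = 1 ↔ ∃ a b c, n = 3 ^ a * 4 ^ b * 7 ^ c := by
  constructor
  · intro h
    obtain ⟨a, ha, _, h1⟩ := nStrip_spec 3 (by omega) n hn
    obtain ⟨b, hb, _, h2⟩ := nStrip_spec 4 (by omega) (nStrip 3 n) h1
    obtain ⟨c, hc, _, _⟩ := nStrip_spec 7 (by omega) (nStrip 4 (nStrip 3 n)) h2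
    rw [h, mul_one] at hc
    exact ⟨a, b, c, by rw [ha, hb, hc]; ring⟩
  · rintro ⟨a, b, c, rfl⟩
    have h7pos : 1 ≤ (7:ℕ) ^ c := Nat.pow_pos (by omega)
    have h47pos : 1 ≤ (4:ℕ) ^ b * 7 ^ c := Nat.mul_pos (Nat.pow_pos (by omega)) h7pos
    have hnd3 : ¬ (3:ℕ) ∣ 4 ^ b * 7 ^ c :=
      not_dvd_of_prime_pows (by norm_num) (by decide) (by decide) b c
    rw [mul_assoc, nStrip_pow_mul 3 (by omega) _ h47pos a, nStrip_of_not_dvd 3 _ hnd3,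
        nStrip_pow_mul 4 (by omega) _ h7pos b, nStrip_of_not_dvd 4 _ (not_four_dvd_seven_pow c),
        show (7:ℕ) ^ c = 7 ^ c * 1 from (mul_one _).symm,
        nStrip_pow_mul 7 (by omega) 1 (by omega) c,
        nStrip_of_not_dvd 7 1 (by decide)]


-- ===== bridge: the Int/Dict port computes the Nat model =====
lemma insert_insert_same (d : PySem.Dict Int Int) (k a b : Int) :
    (d.insert k a).insert k b = d.insert k b := by
  apply PySem.Dict.ext
  by_cases hc : d.contains k = true
  · rw [PySem.Dict.items_insert_of_contains _ b (PySem.Dict.contains_insert_self d k a),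
        PySem.Dict.items_insert_of_contains d a hc,
        PySem.Dict.items_insert_of_contains d b hc, List.map_map]
    apply List.map_congr_left
    intro p _
    by_cases hp : (p.1 == k) = true
    · simp [Function.comp, hp]
    · simp [Function.comp, hp]
  · have hcf : d.contains k = false := by revert hc; cases d.contains k <;> simp
    rw [PySem.Dict.items_insert_of_contains _ b (PySem.Dict.contains_insert_self d k a),
        PySem.Dict.items_insert_of_not_contains d a hcf,
        PySem.Dict.items_insert_of_not_contains d b hcf, List.map_append]
    have hnk : ∀ p ∈ d.items, (p.1 == k) = false := by
      intro p hp
      have : p.1 ∈ d.keys := by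
        simp only [PySem.Dict.keys]
        exact List.mem_map_of_mem hp
      by_contra hb
      have hpk : p.1 = k := by
        revert hb; cases hbe : (p.1 == k) <;> simp_all
      rw [PySem.Dict.contains_eq_decide_mem_keys] at hcf
      simp [← hpk, this] at hcf
    have hmapid : List.map (fun p => if (p.1 == k) = true then (k, b) else p) d.items = d.items := by
      conv_rhs => rw [← List.map_id d.items]
      exact List.map_congr_left (fun p hp => by rw [if_neg (by simp [hnk p hp])]; rfl)
    rw [hmapid]
    simp

lemma pvInner_eq (p : ℕ) (hp : 2 ≤ p) : ∀ m : ℕ, 1 ≤ m → ∀ fac : PySem.Dict Int Int,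
    pvInner (p : Int) fac (m : Int) =
      ((if p ∣ m then fac.insert (p : Int) (fac.getD (p : Int) 0 + ((nCount p m : ℕ) : Int)) else fac),
       ((nStrip p m : ℕ) : Int)) := by
  intro m
  induction m using Nat.strong_induction_on with
  | _ m ih =>
    intro hm fac
    have hmod : PySem.Int.mod (m : Int) (p : Int) = 0 ↔ p ∣ m := by
      rw [PySem.Int.mod_natCast]
      exact_mod_cast (Nat.dvd_iff_mod_eq_zero (m := p) (n := m)).symm
    rw [pvInner]
    by_cases hd : p ∣ m
    · rw [dif_pos ⟨by exact_mod_cast hp, by exact_mod_cast hm, hmod.mpr hd⟩,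
          PySem.Int.floordiv_natCast]
      have hple : p ≤ m := Nat.le_of_dvd (by omega) hd
      have hq1 : 1 ≤ m / p := (Nat.le_div_iff_mul_le (by omega)).mpr (by omega)
      rw [ih (m / p) (Nat.div_lt_self (by omega) (by omega)) hq1]
      rw [if_pos hd, nCount_step p m ⟨hp, hm, hd⟩, nStrip_step p m ⟨hp, hm, hd⟩]
      by_cases hd' : p ∣ m / p
      · rw [if_pos hd', PySem.Dict.getD_insert_self, insert_insert_same]
        have hv : fac.getD (p : Int) 0 + 1 + ((nCount p (m / p) : ℕ) : Int)
            = fac.getD (p : Int) 0 + ((nCount p (m / p) + 1 : ℕ) : Int) := by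
          push_cast; ring
        rw [hv]
      · rw [if_neg hd', nCount_of_not_dvd p (m / p) hd']
        have hv : fac.getD (p : Int) 0 + 1
            = fac.getD (p : Int) 0 + ((0 + 1 : ℕ) : Int) := by
          push_cast; ring
        rw [hv]
    · rw [dif_neg (fun hc => hd (hmod.mp hc.2.2)), if_neg hd,
          nStrip_of_not_dvd p m hd]

def liftD (fac : PySem.Dict Int Int) (l : List (ℕ × ℕ)) : PySem.Dict Int Int :=
  l.foldl (fun f pk => f.insert ((pk.1 : ℕ) : Int) ((pk.2 : ℕ) : Int)) fac

lemma liftD_nil (fac : PySem.Dict Int Int) : liftD fac [] = fac := rfl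

lemma liftD_cons (fac : PySem.Dict Int Int) (pk : ℕ × ℕ) (l : List (ℕ × ℕ)) :
    liftD fac (pk :: l) = liftD (fac.insert (pk.1 : Int) (pk.2 : Int)) l := rfl

lemma liftD_append (fac : PySem.Dict Int Int) (l l' : List (ℕ × ℕ)) :
    liftD fac (l ++ l') = liftD (liftD fac l) l' := by
  simp [liftD, List.foldl_append]

lemma pvOuter_eq : ∀ (k m d : ℕ), m + 2 - d ≤ k → 2 ≤ d → 1 ≤ m →
    ∀ fac : PySem.Dict Int Int, (∀ x ∈ fac.keys, ∃ j : ℕ, x = (j : Int) ∧ j < d) →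
    pvOuter fac (m : Int) (d : Int) = (liftD fac (nFac m d).1, ((nFac m d).2 : Int)) := by
  intro k
  induction k with
  | zero =>
    intro m d hk hd hm fac hkeys
    have hng : ¬ d * d ≤ m := by
      have h2 : d ≤ d * d := Nat.le_mul_of_pos_left d (by omega)
      omega
    have hngI : ¬ (2 ≤ (d : Int) ∧ (d : Int) * (d : Int) ≤ (m : Int)) := fun hc =>
      hng (by exact_mod_cast hc.2)
    rw [pvOuter, dif_neg hngI, nFac_neg m d (fun hc => hng hc.2), liftD_nil]
  | succ k ih =>
    intro m d hk hd hm fac hkeys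
    rw [pvOuter]
    by_cases hg : d * d ≤ m
    · have hgi : 2 ≤ (d : Int) ∧ (d : Int) * (d : Int) ≤ (m : Int) := by
        constructor
        · exact_mod_cast hd
        · exact_mod_cast hg
      rw [dif_pos hgi, pvInner_eq d hd m hm fac]
      have hdm : d ≤ m := le_trans (Nat.le_mul_of_pos_left d (by omega)) hg
      have hnotin : fac.contains (d : Int) = false := by
        rw [PySem.Dict.contains_eq_decide_mem_keys]
        simp only [decide_eq_false_iff_not]
        intro hmem
        obtain ⟨j, hj1, hj2⟩ := hkeys _ hmem
        have : j = d := by exact_mod_cast hj1.symm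
        omega
      have hg0 : fac.getD (d : Int) 0 = 0 := PySem.Dict.getD_of_not_contains fac 0 hnotin
      have hm' : 1 ≤ nStrip d m := nStrip_pos d m hm
      have hkeys' : ∀ (dict' : PySem.Dict Int Int), dict' = fac ∨
          dict' = fac.insert (d : Int) ((nCount d m : ℕ) : Int) →
          ∀ x ∈ dict'.keys, ∃ j : ℕ, x = (j : Int) ∧ j < d + 1 := by
        intro dict' hcase x hx
        rcases hcase with rfl | rfl
        · obtain ⟨j, hj1, hj2⟩ := hkeys x hx
          exact ⟨j, hj1, by omega⟩
        · rcases ((PySem.Dict.mem_keys_insert _ _ _ _).mp hx) with h | h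
          · exact ⟨d, h, by omega⟩
          · obtain ⟨j, hj1, hj2⟩ := hkeys x h
            exact ⟨j, hj1, by omega⟩
      have hcast1 : (d : Int) + 1 = ((d + 1 : ℕ) : Int) := by push_cast; ring
      rw [nFac_pos m d ⟨hd, hg⟩]
      by_cases hc : nCount d m = 0
      · have hnd : ¬ d ∣ m := fun hdvd => by
          have := nCount_pos_of_dvd d m hd hm hdvd; omega
        rw [if_neg hnd, if_pos hc, hcast1]
        exact ih (nStrip d m) (d + 1) (by have := nStrip_le d m; omega) (by omega) hm'
          fac (hkeys' fac (Or.inl rfl))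
      · have hdvd : d ∣ m := by
          by_contra hnd
          exact hc (nCount_of_not_dvd d m hnd)
        rw [if_pos hdvd, if_neg hc, hg0, zero_add, hcast1, liftD_cons]
        exact ih (nStrip d m) (d + 1) (by have := nStrip_le d m; omega) (by omega) hm'
          _ (hkeys' _ (Or.inr rfl))
    · have hgi : ¬ (2 ≤ (d : Int) ∧ (d : Int) * (d : Int) ≤ (m : Int)) := by
        intro hc
        exact hg (by exact_mod_cast hc.2)
      rw [dif_neg hgi, nFac_neg m d (fun hc => hg hc.2), liftD_nil]


lemma castKeys_nodup (l : List (ℕ × ℕ)) (hnd : (l.map Prod.fst).Nodup) :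
    (l.map (fun pk => ((pk.1 : ℕ) : Int))).Nodup := by
  have h : l.map (fun pk => ((pk.1 : ℕ) : Int)) = (l.map Prod.fst).map (fun j : ℕ => (j : Int)) := by
    rw [List.map_map]; rfl
  rw [h]
  exact hnd.map (fun a b hab => by exact_mod_cast hab)

lemma liftD_items (l : List (ℕ × ℕ)) (hnd : (l.map Prod.fst).Nodup) :
    (liftD PySem.Dict.empty l).items = l.map (fun pk => (((pk.1 : ℕ) : Int), ((pk.2 : ℕ) : Int))) := by
  have hfresh : ∀ pk ∈ l, (PySem.Dict.empty : PySem.Dict Int Int).contains ((pk.1 : ℕ) : Int) = false :=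
    fun pk _ => PySem.Dict.contains_empty _
  have := PySem.Dict.items_foldl_insert_fresh l (fun pk => ((pk.1 : ℕ) : Int))
    (fun pk => ((pk.2 : ℕ) : Int)) PySem.Dict.empty hfresh (castKeys_nodup l hnd)
  simpa [liftD, show (PySem.Dict.empty : PySem.Dict Int Int).items = [] from rfl] using this

lemma liftD_keys (l : List (ℕ × ℕ)) (hnd : (l.map Prod.fst).Nodup) :
    (liftD PySem.Dict.empty l).keys = l.map (fun pk => ((pk.1 : ℕ) : Int)) := by
  simp only [PySem.Dict.keys, liftD_items l hnd, List.map_map]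
  rfl

lemma liftD_keys_nodup (l : List (ℕ × ℕ)) (hnd : (l.map Prod.fst).Nodup) :
    (liftD PySem.Dict.empty l).keys.Nodup := by
  rw [liftD_keys l hnd]
  exact castKeys_nodup l hnd

lemma liftD_getD (l : List (ℕ × ℕ)) (hnd : (l.map Prod.fst).Nodup) (p : ℕ) :
    (liftD PySem.Dict.empty l).getD ((p : ℕ) : Int) 0 = ((lkp l p : ℕ) : Int) := by
  by_cases hm : p ∈ l.map Prod.fst
  · have hmem : (((p : ℕ) : Int), ((lkp l p : ℕ) : Int)) ∈ (liftD PySem.Dict.empty l).items := by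
      rw [liftD_items l hnd]
      exact List.mem_map_of_mem (lkp_mem l p hm)
    exact PySem.Dict.getD_of_mem_items _ hmem (liftD_keys_nodup l hnd) 0
  · have hcont : (liftD PySem.Dict.empty l).contains ((p : ℕ) : Int) = false := by
      rw [PySem.Dict.contains_eq_decide_mem_keys, liftD_keys l hnd]
      simp only [decide_eq_false_iff_not]
      intro hmem
      obtain ⟨pk, hpk, heq⟩ := List.mem_map.mp hmem
      have : pk.1 = p := by exact_mod_cast heq
      exact hm (this ▸ List.mem_map_of_mem hpk)
    rw [PySem.Dict.getD_of_not_contains _ 0 hcont, lkp_not_mem l p hm]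
    simp

-- ===== VERDICT (by name: the statement is the Claim_ definition above) =====
theorem primaryFactor347_spec : Claim_equal_primaryFactor347 := by
  intro n _
  show primaryFactor347 n = primaryFactor347_alt n
  by_cases hle : n ≤ 1
  · rw [primaryFactor347, primaryFactor347_alt, if_pos hle, if_pos hle]
  · have hn2 : (2 : Int) ≤ n := by omega
    have hcast : ((n.toNat : ℕ) : Int) = n := Int.toNat_of_nonneg (by omega)
    set N := n.toNat with hNdef
    have hN2 : 2 ≤ N := by omega
    rw [primaryFactor347, primaryFactor347_alt, if_neg hle, if_neg hle, ← hcast]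
    have e2 : (2 : Int) = ((2 : ℕ) : Int) := by norm_num
    have e3 : (3 : Int) = ((3 : ℕ) : Int) := by norm_num
    have e4 : (4 : Int) = ((4 : ℕ) : Int) := by norm_num
    have e7 : (7 : Int) = ((7 : ℕ) : Int) := by norm_num
    -- A's value
    have hA : pvStrip 7 (pvStrip 4 (pvStrip 3 (N : Int))) =
        ((nStrip 7 (nStrip 4 (nStrip 3 N)) : ℕ) : Int) := by
      rw [e3, pvStrip_natCast 3 (by omega), e4, pvStrip_natCast 4 (by omega),
          e7, pvStrip_natCast 7 (by omega)]
    have hAiff : ((pvStrip 7 (pvStrip 4 (pvStrip 3 (N : Int))) == 1) = true)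
        ↔ ∃ a b c, N = 3 ^ a * 4 ^ b * 7 ^ c := by
      rw [hA]
      constructor
      · intro h
        exact (A_char N (by omega)).mp (by exact_mod_cast beq_iff_eq.mp h)
      · intro h
        exact beq_iff_eq.mpr (by exact_mod_cast (A_char N (by omega)).mpr h)
    -- B's value
    obtain ⟨_, _, hPW⟩ := nFac_spec (N + 2) N 2 (by omega) (by omega) (by omega)
      (by intro e he hlt; omega)
    have hnodup : ((nFull N 2).map Prod.fst).Nodup :=
      (hPW.map Prod.fst (fun _ _ h => h)).imp ne_of_lt
    have hemptykeys : ∀ x ∈ (PySem.Dict.empty : PySem.Dict Int Int).keys,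
        ∃ j : ℕ, x = (j : Int) ∧ j < 2 := by
      intro x hx
      simp [PySem.Dict.keys, show (PySem.Dict.empty : PySem.Dict Int Int).items = [] from rfl] at hx
    have houter : pvOuter PySem.Dict.empty (N : Int) 2 =
        (liftD PySem.Dict.empty (nFac N 2).1, ((nFac N 2).2 : Int)) := by
      rw [e2]
      exact pvOuter_eq (N + 2) N 2 (by omega) (by omega) (by omega) _ hemptykeys
    set L := (nFac N 2).1 with hLdef
    set r := (nFac N 2).2 with hrdef
    have hLnodup : (L.map Prod.fst).Nodup := by
      have : nFull N 2 = L ++ (if 1 < r then [(r, 1)] else []) := rfl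
      rw [this, List.map_append] at hnodup
      exact (List.nodup_append.mp hnodup).1
    have hdictfull :
        (if 1 < ((r : ℕ) : Int) then
          (liftD PySem.Dict.empty L).insert ((r : ℕ) : Int)
            ((liftD PySem.Dict.empty L).getD ((r : ℕ) : Int) 0 + 1)
         else liftD PySem.Dict.empty L) = liftD PySem.Dict.empty (nFull N 2) := by
      by_cases hr1 : 1 < r
      · rw [if_pos (by exact_mod_cast hr1)]
        have hrnot : r ∉ L.map Prod.fst := by
          intro hmem
          obtain ⟨pk, hpk, heq⟩ := List.mem_map.mp hmem
          have hfull : nFull N 2 = L ++ [(r, 1)] := by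
            show L ++ (if 1 < r then [(r, 1)] else []) = _
            rw [if_pos hr1]
          have hlt := (List.pairwise_append.mp (hfull ▸ hPW)).2.2 pk hpk (r, 1) (by simp)
          simp only at hlt
          omega
        have hgd : (liftD PySem.Dict.empty L).getD ((r : ℕ) : Int) 0 = 0 := by
          rw [liftD_getD L hLnodup r, lkp_not_mem L r hrnot]
          simp
        rw [hgd]
        have hfull : nFull N 2 = L ++ [(r, 1)] := by
          show L ++ (if 1 < r then [(r, 1)] else []) = _
          rw [if_pos hr1]
        rw [hfull, liftD_append, liftD_cons, liftD_nil]
        norm_num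
      · rw [if_neg (by exact_mod_cast hr1)]
        have hfull : nFull N 2 = L := by
          show L ++ (if 1 < r then [(r, 1)] else []) = L
          rw [if_neg hr1]
          simp
        rw [hfull]
    have hBiff : ((liftD PySem.Dict.empty (nFull N 2)).keys.all
          (fun k => k == 2 || k == 3 || k == 7) &&
        (PySem.Int.mod ((liftD PySem.Dict.empty (nFull N 2)).getD 2 0) 2 == 0)) = true
        ↔ ∃ a b c, N = 3 ^ a * 4 ^ b * 7 ^ c := by
      rw [← model_decision N hN2]
      rw [liftD_keys _ hnodup, e2, liftD_getD _ hnodup 2]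
      rw [Bool.and_eq_true, List.all_eq_true]
      constructor
      · rintro ⟨hkeys, hmod⟩
        constructor
        · intro pk hpk
          have := hkeys _ (List.mem_map_of_mem hpk)
          rw [Bool.or_eq_true, Bool.or_eq_true, beq_iff_eq, beq_iff_eq, beq_iff_eq] at this
          rcases this with (h | h) | h
          · exact Or.inl (by exact_mod_cast h)
          · exact Or.inr (Or.inl (by exact_mod_cast h))
          · exact Or.inr (Or.inr (by exact_mod_cast h))
        · rw [PySem.Int.mod_natCast] at hmod
          have : lkp (nFull N 2) 2 % 2 = 0 := by exact_mod_cast beq_iff_eq.mp hmod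
          omega
      · rintro ⟨hkeys, hmod⟩
        constructor
        · intro x hx
          obtain ⟨pk, hpk, heq⟩ := List.mem_map.mp hx
          subst heq
          rw [Bool.or_eq_true, Bool.or_eq_true, beq_iff_eq, beq_iff_eq, beq_iff_eq]
          rcases hkeys pk hpk with h | h | h
          · exact Or.inl (Or.inl (by exact_mod_cast h))
          · exact Or.inl (Or.inr (by exact_mod_cast h))
          · exact Or.inr (by exact_mod_cast h)
        · rw [PySem.Int.mod_natCast]
          have : lkp (nFull N 2) 2 % 2 = 0 := by omega
          exact beq_iff_eq.mpr (by exact_mod_cast this)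
    -- combine
    simp only [houter, hdictfull]
    rw [Bool.eq_iff_iff, hAiff, hBiff]
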